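-- pv_equiv track=rewrite | github.com/mzhang/foobarWithGoogle | luckytriples.py | solution
-- ===== SOURCE A (Python) =====
-- def solution(l):
--     counter = [0]*len(l)
--     out = 0
--     for i in range(len(l)):
--         j=0
--         for j in range(i):
--             if l[i]%l[j]==0:
--                 counter[i]+=1
--                 out += counter[j]
--     return out
-- ===== SOURCE B (Python) =====
-- def solution(l):
--     n = len(l)
--     total = 0
--     for j in range(n):
--         left = sum(1 for i in range(j) if l[j] % l[i] == 0)
--         right = sum(1 for k in range(j + 1, n) if l[k] % l[j] == 0)
--         total += left * right
--     return total
-- ===== Notes on version B (the rewrite author's own statement) =====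
-- stated objective: alternative
-- what changed: B counts each divisor triple exactly once via its middle element (per-index left*right product over two independent scans) instead of A's stateful running counter array whose entries are accumulated into the total as pairs are discovered.
-- outside the precondition, e.g. on solution([1, 0, 2]): A raises ZeroDivisionError, B raises ZeroDivisionError
import Mathlib
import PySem

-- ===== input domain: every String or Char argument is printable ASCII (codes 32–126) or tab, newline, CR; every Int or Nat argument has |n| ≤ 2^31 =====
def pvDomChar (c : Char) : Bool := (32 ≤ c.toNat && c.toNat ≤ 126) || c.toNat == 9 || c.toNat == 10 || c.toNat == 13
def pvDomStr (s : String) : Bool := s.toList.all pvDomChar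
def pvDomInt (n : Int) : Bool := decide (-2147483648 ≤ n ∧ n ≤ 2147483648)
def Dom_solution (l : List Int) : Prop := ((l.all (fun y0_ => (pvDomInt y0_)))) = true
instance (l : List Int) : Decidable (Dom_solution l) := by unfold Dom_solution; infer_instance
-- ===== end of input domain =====

-- B counts each divisor triple once via its middle element (left*right per index) instead of A's running counter array; objective: alternative decomposition (same O(n^2) cost).


-- ===== PORT A =====
-- inner loop body: 'if l[i]%l[j]==0: counter[i]+=1; out+=counter[j]'
def solStepA (l : List Int) (i : Nat) (st : List Int × Int) (j : Nat) : List Int × Int :=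
  if PySem.Int.mod (l.getD i 0) (l.getD j 0) == 0 then
    (st.1.set i (st.1.getD i 0 + 1), st.2 + st.1.getD j 0)
  else st

def solution (l : List Int) : Int :=
  let n := l.length
  ((List.range n).foldl
    (fun st i => (List.range i).foldl (solStepA l i) st)
    (List.replicate n 0, 0)).2

-- ===== PORT B =====
def solution_alt (l : List Int) : Int :=
  let n := l.length
  (List.range n).foldl
    (fun total j =>
      let left : Int :=
        ((List.range j).countP (fun i => PySem.Int.mod (l.getD j 0) (l.getD i 0) == 0) : Nat)
      let right : Int :=
        ((List.range' (j + 1) (n - (j + 1))).countP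
          (fun k => PySem.Int.mod (l.getD k 0) (l.getD j 0) == 0) : Nat)
      total + left * right)
    0

-- ===== PRECONDITION & SPEC =====
-- A (and B) raise ZeroDivisionError exactly when 0 occurs before the last position; Pre_ excludes those inputs.
def Pre_solution (l : List Int) : Prop := (0 : Int) ∉ l.dropLast
instance (l : List Int) : Decidable (Pre_solution l) := by unfold Pre_solution; infer_instance
def pvWitness_solution : List Int := [1, 1, 2, 4]

def Spec_solution (l : List Int) (out : Int) : Prop := out = solution_alt l
instance (l : List Int) (out : Int) : Decidable (Spec_solution l out) := by unfold Spec_solution; infer_instance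

-- ===== CLAIM (what is proved, stated in full; the proofs are below) =====
def Claim_equal_solution : Prop := ∀ (l : List Int), Dom_solution l → Pre_solution l → Spec_solution l (solution l)

-- ===== LEMMAS AND PROOFS =====
-- divisibility test: index j's value divides index i's value (the test both Pythons make)
def dv (l : List Int) (j i : Nat) : Bool := PySem.Int.mod (l.getD i 0) (l.getD j 0) == 0

-- c l j = number of earlier indices dividing l[j] (A's final counter[j], B's left)
def cnt (l : List Int) (j : Nat) : Int := ((List.range j).countP (fun m => dv l m j) : Nat)

-- counter vector after A has processed the first m outer indices
def V (l : List Int) (m : Nat) : List Int :=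
  (List.range l.length).map (fun t => if t < m then cnt l t else 0)

-- contribution of outer index i to A's out
def S (l : List Int) (i : Nat) : Int :=
  ((List.range i).map (fun j => if dv l j i then cnt l j else 0)).sum

def Out (l : List Int) (m : Nat) : Int := ((List.range m).map (S l)).sum

lemma getD_set_ne (xs : List Int) {i j : Nat} (a : Int) (h : i ≠ j) :
    (xs.set i a).getD j 0 = xs.getD j 0 := by
  simp [List.getD, List.getElem?_set_ne h]

lemma getD_set_self (xs : List Int) {i : Nat} (a : Int) (h : i < xs.length) :
    (xs.set i a).getD i 0 = a := by
  simp [List.getD, h]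

lemma set_getD_self (xs : List Int) {i : Nat} (h : i < xs.length) :
    xs.set i (xs.getD i 0) = xs := by
  rw [List.getD_eq_getElem xs 0 h]; exact List.set_getElem_self h

lemma sum_map_add (f g : Nat → Int) (xs : List Nat) :
    (xs.map (fun x => f x + g x)).sum = (xs.map f).sum + (xs.map g).sum := by
  induction xs with
  | nil => simp
  | cons x xs ih => simp [ih]; ring

-- A's inner loop, characterised
lemma innerA (l : List Int) (i : Nat) (hi : i < l.length) :
    ∀ (m : Nat), m ≤ i → ∀ (v : List Int) (o : Int), v.length = l.length →
    (List.range m).foldl (solStepA l i) (v, o) =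
    (v.set i (v.getD i 0 + (((List.range m).countP (fun j => dv l j i) : Nat) : Int)),
     o + ((List.range m).map (fun j => if dv l j i then v.getD j 0 else 0)).sum) := by
  intro m
  induction m with
  | zero =>
      intro _ v o hv
      simp only [List.range_zero, List.foldl_nil, List.countP_nil, Nat.cast_zero,
        add_zero, List.map_nil, List.sum_nil]
      rw [set_getD_self v (hv ▸ hi)]
  | succ m ih =>
      intro hm v o hv
      have hmi : m < i := hm
      rw [List.range_succ, List.foldl_append, ih (Nat.le_of_lt hmi) v o hv]
      have hvi : i < v.length := hv ▸ hi
      by_cases hd : dv l m i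
      · have hd' : (PySem.Int.mod (l.getD i 0) (l.getD m 0) == 0) = true := hd
        simp only [List.foldl_cons, List.foldl_nil, solStepA, hd', if_true]
        rw [getD_set_self v _ hvi, List.set_set, getD_set_ne v _ (Nat.ne_of_gt hmi)]
        simp only [Prod.mk.injEq]
        refine ⟨?_, ?_⟩
        · congr 1
          rw [List.countP_append]
          simp only [List.countP_cons, List.countP_nil, hd, if_true]
          push_cast
          ring
        · rw [List.map_append, List.sum_append]
          simp only [List.map_cons, List.map_nil, List.sum_cons, List.sum_nil, hd, if_true]
          ring
      · have hd' : (PySem.Int.mod (l.getD i 0) (l.getD m 0) == 0) = false := by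
          simpa [dv] using hd
        simp only [List.foldl_cons, List.foldl_nil, solStepA, hd', Bool.false_eq_true, if_false]
        rw [List.countP_append, List.map_append, List.sum_append]
        simp [hd]

-- A's outer loop, characterised
lemma outerA (l : List Int) :
    ∀ m, m ≤ l.length →
    (List.range m).foldl (fun st i => (List.range i).foldl (solStepA l i) st)
      (List.replicate l.length 0, 0) = (V l m, Out l m) := by
  intro m
  induction m with
  | zero =>
      intro _
      simp [V, Out]
  | succ m ih =>
      intro hm
      have hmn : m < l.length := hm
      rw [List.range_succ, List.foldl_append, ih (Nat.le_of_lt hmn)]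
      have hlen : (V l m).length = l.length := by simp [V]
      rw [List.foldl_cons, List.foldl_nil,
          innerA l m hmn m le_rfl (V l m) (Out l m) hlen]
      have hgm : (V l m).getD m 0 = 0 := by
        rw [List.getD_eq_getElem _ 0 (hlen ▸ hmn)]
        simp [V]
      simp only [Prod.mk.injEq]
      refine ⟨?_, ?_⟩
      · -- counter vector update
        rw [hgm, zero_add]
        apply List.ext_getElem
        · simp [V]
        · intro t ht1 ht2
          simp only [V, List.length_map, List.length_range] at ht2
          rw [List.getElem_set]
          by_cases htm : t = m
          · subst htm
            simp [V, cnt]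
          · have hmt : ¬ (m = t) := fun h => htm h.symm
            simp only [if_neg hmt, V, List.getElem_map, List.getElem_range]
            have : t < m ↔ t < m + 1 := by omega
            simp [this]
      · -- out update
        simp only [Out, List.range_succ, List.map_append, List.sum_append,
          List.map_cons, List.map_nil, List.sum_cons, List.sum_nil, add_zero]
        congr 1
        rw [S]
        apply congrArg
        apply List.map_congr_left
        intro j hj
        rw [List.mem_range] at hj
        have hjn : j < l.length := Nat.lt_trans hj hmn
        have : (V l m).getD j 0 = cnt l j := by
          rw [List.getD_eq_getElem _ 0 (hlen ▸ hjn)]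
          simp [V, hj]
        rw [this]

lemma solution_eq_Out (l : List Int) : solution l = Out l l.length := by
  rw [solution]
  rw [outerA l l.length le_rfl]

lemma foldl_add_general (g : Nat → Int) :
    ∀ (xs : List Nat) (init : Int),
    xs.foldl (fun t j => t + g j) init = init + (xs.map g).sum := by
  intro xs
  induction xs with
  | nil => simp
  | cons x xs ih => intro init; simp [ih]; ring

lemma alt_eq (l : List Int) :
    solution_alt l =
    ((List.range l.length).map (fun j =>
      cnt l j * (((List.range' (j + 1) (l.length - (j + 1))).countP
        (fun k => dv l j k) : Nat) : Int))).sum := by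
  refine Eq.trans ?_ (zero_add _)
  exact foldl_add_general _ (List.range l.length) 0

-- summing a triangle by its middle index
lemma exch (p : Nat → Nat → Bool) (c : Nat → Int) :
    ∀ n : Nat,
    ((List.range n).map (fun i =>
      ((List.range i).map (fun j => if p j i then c j else 0)).sum)).sum
    = ((List.range n).map (fun j =>
      c j * (((List.range' (j + 1) (n - (j + 1))).countP (fun k => p j k) : Nat) : Int))).sum := by
  intro n
  induction n with
  | zero => simp
  | succ n ih =>
      have hmap : ((List.range n).map (fun j =>
          c j * (((List.range' (j + 1) (n + 1 - (j + 1))).countP (fun k => p j k) : Nat) : Int)))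
          = (List.range n).map (fun j =>
          c j * (((List.range' (j + 1) (n - (j + 1))).countP (fun k => p j k) : Nat) : Int)
          + (if p j n then c j else 0)) := by
        apply List.map_congr_left
        intro j hj
        rw [List.mem_range] at hj
        have h1 : n + 1 - (j + 1) = (n - (j + 1)) + 1 := by omega
        have h2 : j + 1 + 1 * (n - (j + 1)) = n := by omega
        rw [h1, List.range'_concat, h2, List.countP_append]
        simp only [List.countP_cons, List.countP_nil, Nat.zero_add]
        push_cast
        by_cases hp : p j n
        · simp [hp]; ring
        · simp [hp]
      rw [List.range_succ]
      simp only [List.map_append, List.sum_append, List.map_cons, List.map_nil,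
        List.sum_cons, List.sum_nil, Nat.sub_self, List.range'_zero, List.countP_nil,
        Nat.cast_zero, mul_zero, add_zero]
      rw [hmap, sum_map_add, ih]

-- ===== VERDICT (by name: the statement is the Claim_ definition above) =====
theorem solution_spec : Claim_equal_solution := by
  intro l _ _
  unfold Spec_solution
  rw [solution_eq_Out, alt_eq, Out]
  simpa [S] using exch (fun j i => dv l j i) (cnt l) l.length
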